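-- pv_equiv track=rewrite | github.com/ChengyueLiu/binary-v-confirmer | main/extractors/bin_function_feature_extractor/objdump_parser.py | find_text_section_lines
-- ===== SOURCE A (Python) =====
-- def find_text_section_lines(lines):
--     start_flag = False
--     text_section_lines = []
--     for line in lines:
--         if line == "Disassembly of section .text:\n":
--             start_flag = True
--         elif line.startswith("Disassembly of section "):
--             start_flag = False
--
--         if not start_flag:
--             continue
--
--         text_section_lines.append(line)
--
--     return text_section_lines
-- ===== SOURCE B (Python) =====
-- def find_text_section_lines(lines):
--     TEXT = "Disassembly of section .text:\n"
--     HDR = "Disassembly of section "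
--     # Split into sections: each section is (header line, body lines until next header).
--     def sections(ls):
--         secs = []
--         i = 0
--         while i < len(ls) and not ls[i].startswith(HDR):
--             i += 1  # lines before the first header belong to no section
--         while i < len(ls):
--             j = i + 1
--             while j < len(ls) and not ls[j].startswith(HDR):
--                 j += 1
--             secs.append((ls[i], ls[i + 1:j]))
--             i = j
--         return secs
--     # Keep exactly the .text sections, flatten header + body in order.
--     return [line for head, body in sections(lines) if head == TEXT
--             for line in [head] + body]
-- ===== Notes on version B (the rewrite author's own statement) =====
-- stated objective: alternative
-- what changed: Replaces the boolean start_flag state machine by a two-phase pass: split the lines into (header, body) sections first, then filter the .text sections and flatten them.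
import Mathlib
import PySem

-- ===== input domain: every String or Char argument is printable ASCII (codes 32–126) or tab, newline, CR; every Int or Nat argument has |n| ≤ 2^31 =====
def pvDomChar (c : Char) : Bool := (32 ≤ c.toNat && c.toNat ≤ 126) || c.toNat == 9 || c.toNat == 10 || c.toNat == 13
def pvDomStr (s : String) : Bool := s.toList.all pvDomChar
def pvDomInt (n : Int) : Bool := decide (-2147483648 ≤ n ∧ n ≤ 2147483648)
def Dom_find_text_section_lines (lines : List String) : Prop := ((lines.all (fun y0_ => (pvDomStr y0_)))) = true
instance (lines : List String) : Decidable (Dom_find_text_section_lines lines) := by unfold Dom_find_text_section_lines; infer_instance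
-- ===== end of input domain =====

-- B replaces A's boolean start_flag state machine by a two-phase pass: split the
-- lines into (header, body) sections, then filter the .text sections and flatten.

-- ===== PORT A =====
-- A: one scan threading start_flag, appending the line whenever the flag is up.
def find_text_section_lines (lines : List String) : List String :=
  (lines.foldl
    (fun (st : Bool × List String) line =>
      let start_flag :=
        if line = "Disassembly of section .text:\n" then true
        else if PySem.Str.startswith line "Disassembly of section " then false
        else st.1
      if start_flag then (start_flag, st.2 ++ [line]) else (start_flag, st.2))
    (false, [])).2

-- ===== PORT B =====
def pvIsHeader (l : String) : Bool := PySem.Str.startswith l "Disassembly of section "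

-- B's sections(ls): drop pre-header lines; each section is the header line plus
-- the body lines scanned up to (not including) the next header.
def pvSections : List String → List (String × List String)
  | [] => []
  | l :: rest =>
    if pvIsHeader l then
      (l, rest.takeWhile (fun x => !pvIsHeader x)) ::
        pvSections (rest.dropWhile (fun x => !pvIsHeader x))
    else pvSections rest
termination_by ls => ls.length
decreasing_by
  · simpa using Nat.lt_succ_of_le (List.length_dropWhile_le _ rest)
  · simp

def find_text_section_lines_alt (lines : List String) : List String :=
  ((pvSections lines).filter
      (fun s => s.1 == "Disassembly of section .text:\n")).flatMap
    (fun s => s.1 :: s.2)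

-- ===== PRECONDITION & SPEC =====
def Spec_find_text_section_lines (lines : List String) (out : List String) : Prop := out = find_text_section_lines_alt lines
instance (lines : List String) (out : List String) : Decidable (Spec_find_text_section_lines lines out) := by unfold Spec_find_text_section_lines; infer_instance

-- ===== CLAIM (what is proved, stated in full; the proofs are below) =====
def Claim_equal_find_text_section_lines : Prop := ∀ (lines : List String), Dom_find_text_section_lines lines → Spec_find_text_section_lines lines (find_text_section_lines lines)

-- ===== LEMMAS AND PROOFS =====

-- A's loop, output only, with the flag as an explicit argument.
def pvLoopA : Bool → List String → List String
  | _, [] => []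
  | flag, l :: rest =>
    let f :=
      if l = "Disassembly of section .text:\n" then true
      else if pvIsHeader l then false
      else flag
    (if f then [l] else []) ++ pvLoopA f rest

def pvStepA (st : Bool × List String) (line : String) : Bool × List String :=
  let start_flag :=
    if line = "Disassembly of section .text:\n" then true
    else if PySem.Str.startswith line "Disassembly of section " then false
    else st.1
  if start_flag then (start_flag, st.2 ++ [line]) else (start_flag, st.2)

theorem pvPortA_eq (lines : List String) :
    find_text_section_lines lines = (lines.foldl pvStepA (false, [])).2 := rfl

theorem pvFoldA_eq (ls : List String) : ∀ (flag : Bool) (acc : List String),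
    (ls.foldl pvStepA (flag, acc)).2 = acc ++ pvLoopA flag ls := by
  induction ls with
  | nil => intro flag acc; simp [pvLoopA]
  | cons l rest ih =>
    intro flag acc
    rw [List.foldl_cons]
    by_cases hT : l = "Disassembly of section .text:\n"
    · have hstep : pvStepA (flag, acc) l = (true, acc ++ [l]) := by simp [pvStepA, hT]
      rw [hstep, ih]
      simp [pvLoopA, hT]
    · by_cases hH : PySem.Str.startswith l "Disassembly of section " = true
      all_goals have hH' := hH; simp at hH'
      · have hstep : pvStepA (flag, acc) l = (false, acc) := by simp [pvStepA, hT, hH']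
        rw [hstep, ih]
        simp [pvLoopA, hT, pvIsHeader, hH']
      · cases flag
        · have hstep : pvStepA (false, acc) l = (false, acc) := by
            simp [pvStepA, hT, hH']
          rw [hstep, ih]
          simp [pvLoopA, hT, pvIsHeader, hH']
        · have hstep : pvStepA (true, acc) l = (true, acc ++ [l]) := by
            simp [pvStepA, hT, hH']
          rw [hstep, ih]
          simp [pvLoopA, hT, pvIsHeader, hH']

theorem pvTextIsHeader : pvIsHeader "Disassembly of section .text:\n" = true := by decide

-- skipping: with the flag down, non-header lines are dropped
theorem pvLoopA_skip (body : List String) (rest : List String)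
    (h : ∀ x ∈ body, pvIsHeader x = false) :
    pvLoopA false (body ++ rest) = pvLoopA false rest := by
  induction body with
  | nil => rfl
  | cons x b ih =>
    have hx := h x (by simp)
    have hxT : x ≠ "Disassembly of section .text:\n" := by
      intro e; rw [e, pvTextIsHeader] at hx; exact absurd hx (by simp)
    simp only [List.cons_append, pvLoopA, hx, hxT, if_false]
    simpa using ih (fun y hy => h y (by simp [hy]))

-- emitting: with the flag up, non-header lines are kept and the flag stays up
theorem pvLoopA_emit (body : List String) (rest : List String)
    (h : ∀ x ∈ body, pvIsHeader x = false) :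
    pvLoopA true (body ++ rest) = body ++ pvLoopA true rest := by
  induction body with
  | nil => rfl
  | cons x b ih =>
    have hx := h x (by simp)
    simp only [List.cons_append, pvLoopA]
    by_cases hxT : x = "Disassembly of section .text:\n"
    · simp [hxT, ih (fun y hy => h y (by simp [hy]))]
    · simp [hxT, hx, ih (fun y hy => h y (by simp [hy]))]

-- at a header line (or the end) the incoming flag is irrelevant
theorem pvLoopA_indep (f1 f2 : Bool) (ls : List String)
    (h : ls = [] ∨ ∃ l r, ls = l :: r ∧ pvIsHeader l = true) :
    pvLoopA f1 ls = pvLoopA f2 ls := by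
  rcases h with h | ⟨l, r, rfl, hl⟩
  · subst h; rfl
  · by_cases hT : l = "Disassembly of section .text:\n" <;>
      simp [pvLoopA, hT, hl]

theorem pvDropWhile_shape (rest : List String) :
    rest.dropWhile (fun x => !pvIsHeader x) = [] ∨
      ∃ l r, rest.dropWhile (fun x => !pvIsHeader x) = l :: r ∧ pvIsHeader l = true := by
  induction rest with
  | nil => left; rfl
  | cons x b ih =>
    by_cases hx : pvIsHeader x = true
    · right; exact ⟨x, b, by simp [hx], hx⟩
    · simpa [List.dropWhile_cons, hx] using ih

theorem pvFilter_flatMap (xs : List (String × List String)) :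
    ((xs.filter (fun s => s.1 == "Disassembly of section .text:\n")).flatMap
        (fun s => s.1 :: s.2)) =
      xs.flatMap (fun s =>
        if s.1 = "Disassembly of section .text:\n" then s.1 :: s.2 else []) := by
  induction xs with
  | nil => rfl
  | cons s xs ih =>
    by_cases h : s.1 = "Disassembly of section .text:\n" <;>
      simp [h, ih]

theorem pvMain : ∀ n, ∀ ls : List String, ls.length ≤ n →
    pvLoopA false ls =
      (pvSections ls).flatMap (fun s =>
        if s.1 = "Disassembly of section .text:\n" then s.1 :: s.2 else []) := by
  intro n
  induction n with
  | zero =>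
    intro ls h
    have : ls = [] := List.eq_nil_of_length_eq_zero (Nat.le_zero.mp h)
    subst this; simp [pvLoopA, pvSections]
  | succ n ih =>
    intro ls h
    match ls with
    | [] => simp [pvLoopA, pvSections]
    | l :: rest =>
      have hlen : rest.length ≤ n := by simpa using h
      by_cases hH : pvIsHeader l = true
      · rw [pvSections]
        simp only [hH, if_pos]
        set tw := rest.takeWhile (fun x => !pvIsHeader x) with htw
        set dw := rest.dropWhile (fun x => !pvIsHeader x) with hdw
        have htwmem : ∀ x ∈ tw, pvIsHeader x = false := by
          intro x hx
          have := List.mem_takeWhile_imp hx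
          simpa using this
        have hdwlen : dw.length ≤ n :=
          le_trans (List.length_dropWhile_le _ rest) hlen
        have hrest : tw ++ dw = rest := List.takeWhile_append_dropWhile
        have hdwshape := pvDropWhile_shape rest
        rw [← hdw] at hdwshape
        by_cases hT : l = "Disassembly of section .text:\n"
        · have : pvLoopA false (l :: rest) = l :: pvLoopA true rest := by
            simp [pvLoopA, hT]
          rw [this, ← hrest, pvLoopA_emit tw dw htwmem,
            pvLoopA_indep true false dw hdwshape, ih dw hdwlen]
          simp [hT]
        · have : pvLoopA false (l :: rest) = pvLoopA false rest := by
            simp [pvLoopA, hT, hH]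
          rw [this, ← hrest, pvLoopA_skip tw dw htwmem, ih dw hdwlen]
          simp [hT]
      · have hlT : l ≠ "Disassembly of section .text:\n" := by
          intro e; rw [e, pvTextIsHeader] at hH; exact hH rfl
        have : pvLoopA false (l :: rest) = pvLoopA false rest := by
          simp [pvLoopA, hlT, hH]
        rw [this, pvSections]
        simp only [hH, if_neg, Bool.false_eq_true, not_false_eq_true]
        exact ih rest hlen

-- ===== VERDICT (by name: the statement is the Claim_ definition above) =====
theorem find_text_section_lines_spec : Claim_equal_find_text_section_lines := by
  intro lines _
  unfold Spec_find_text_section_lines find_text_section_lines_alt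
  rw [pvPortA_eq, pvFoldA_eq, List.nil_append, pvFilter_flatMap]
  exact pvMain lines.length lines le_rfl
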